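-- pv_equiv track=rewrite | github.com/TomoTom0/UmaTournamentBot | src/Tournament.py | judgeGroup
-- ===== SOURCE A (Python) =====
-- import math
--
-- def judgeGroup(num_members, numberIn, forceAll=False):
--     number = int(numberIn)
--     num_ind = int(math.log(num_members-1, number)) if num_members > 1 else 0
--     if num_ind == 0:
--         return [num_members]
--     elif forceAll is True:
--         standard_num = num_members // number ** num_ind
--         res = num_members - standard_num * number ** num_ind
--         return [standard_num + 1 if num < res else standard_num for num in range(number**(num_ind))]
--     elif num_members < max(2, number - 1) * number ** num_ind:
--         return [number for num in range(number**(num_ind-1))]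
--     else:
--         res = num_members - (number - 1) * number ** num_ind
--         return [number if num < res else number - 1 for num in range(number**(num_ind))]
-- ===== SOURCE B (Python) =====
-- def judgeGroup(num_members, numberIn, forceAll=False):
--     number = int(numberIn)
--
--     # exact integer logarithm by repeated floor division (largest k with number**k <= x)
--     def ilog(x):
--         return 0 if x < number else 1 + ilog(x // number)
--
--     k = ilog(num_members - 1) if num_members > 1 else 0
--     if k == 0:
--         return [num_members]
--     count = number ** k
--
--     # Both the forceAll branch and the large-members branch are the balanced split of
--     # num_members into count parts (parts differ by at most 1, bigger parts first);
--     # the small-members branch is the balanced split of count into count//number parts.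
--     if forceAll is not True and num_members < max(2, number - 1) * count:
--         total, parts = count, count // number
--     else:
--         total, parts = num_members, count
--
--     # greedy peel: each step takes the ceiling of the average of what remains
--     out = []
--     while parts > 0:
--         q = (total + parts - 1) // parts
--         out.append(q)
--         total -= q
--         parts -= 1
--     return out
-- ===== Notes on version B (the rewrite author's own statement) =====
-- stated objective: alternative
-- what changed: B computes the exponent by recursive floor division instead of float math.log, collapses A's forceAll and large-members branches into one balanced-split computation, and builds the list by a greedy loop that repeatedly peels off the ceiling of the average of what remains, instead of A's three separate range comprehensions with per-element comparisons.
import Mathlib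
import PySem

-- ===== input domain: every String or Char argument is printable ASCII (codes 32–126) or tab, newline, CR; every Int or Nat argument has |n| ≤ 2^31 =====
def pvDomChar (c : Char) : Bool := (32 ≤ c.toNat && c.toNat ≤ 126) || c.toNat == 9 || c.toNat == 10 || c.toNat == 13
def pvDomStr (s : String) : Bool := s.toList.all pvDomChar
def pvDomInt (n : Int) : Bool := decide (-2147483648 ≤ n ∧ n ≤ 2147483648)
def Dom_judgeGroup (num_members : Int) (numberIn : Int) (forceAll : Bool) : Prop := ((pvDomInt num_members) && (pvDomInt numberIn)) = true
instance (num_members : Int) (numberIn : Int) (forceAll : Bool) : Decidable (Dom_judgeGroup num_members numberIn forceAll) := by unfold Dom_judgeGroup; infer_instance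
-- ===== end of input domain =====

-- B replaces A's float-log and three per-element range comprehensions by a division-based
-- recursive integer logarithm and one greedy balanced-split loop shared by two of A's branches
-- (objective: alternative; same output-dominated cost).

-- ===== PORT A =====
-- `int(math.log(num_members-1, number))` ported as the exact integer floor logarithm (Nat.log).
-- This is exact on Pre_judgeGroup, which excludes bases < 2 (where Python raises) and the exact
-- powers num_members-1 = number^k, k ≥ 2, combined with forceAll (where CPython's float log may
-- round just below the integer and change A's answer).
def judgeGroup (num_members : Int) (numberIn : Int) (forceAll : Bool) : List Int :=
  let number := numberIn
  let num_ind : Nat :=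
    if 1 < num_members then Nat.log number.toNat (num_members - 1).toNat else 0
  if num_ind = 0 then [num_members]
  else if forceAll = true then
    let standard_num := PySem.Int.floordiv num_members (number ^ num_ind)
    let res := num_members - standard_num * number ^ num_ind
    (PySem.List.pyRange 0 (number ^ num_ind) 1).map
      (fun num => if num < res then standard_num + 1 else standard_num)
  else if num_members < max 2 (number - 1) * number ^ num_ind then
    (PySem.List.pyRange 0 (number ^ (num_ind - 1)) 1).map (fun _ => number)
  else
    let res := num_members - (number - 1) * number ^ num_ind
    (PySem.List.pyRange 0 (number ^ num_ind) 1).map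
      (fun num => if num < res then number else number - 1)

-- ===== PORT B =====
-- Source B's `ilog(x) = 0 if x < number else 1 + ilog(x // number)`; the guard's extra conjunct
-- `2 ≤ number` only makes the recursion total (in Source B ilog is only reached with number ≥ 2
-- inside Pre_, where it never changes a value).
def ilogGo (number : Int) : Nat → Int → Nat
  | 0, _ => 0
  | fuel + 1, x =>
    if 2 ≤ number ∧ number ≤ x then 1 + ilogGo number fuel (PySem.Int.floordiv x number)
    else 0

def ilogB (number x : Int) : Nat := ilogGo number x.toNat x

-- Source B's `while parts > 0: q = (total+parts-1)//parts; out.append(q); total -= q; parts -= 1`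
def balancedGo : Nat → Int → Int → List Int
  | 0, _, _ => []
  | fuel + 1, total, parts =>
    if 0 < parts then
      PySem.Int.floordiv (total + parts - 1) parts
        :: balancedGo fuel (total - PySem.Int.floordiv (total + parts - 1) parts) (parts - 1)
    else []

def balancedLoop (total parts : Int) : List Int := balancedGo parts.toNat total parts

def judgeGroup_alt (num_members : Int) (numberIn : Int) (forceAll : Bool) : List Int :=
  let number := numberIn
  let k : Nat := if 1 < num_members then ilogB number (num_members - 1) else 0
  if k = 0 then [num_members]
  else
    let count := number ^ k
    let tp : Int × Int :=
      if forceAll = false ∧ num_members < max 2 (number - 1) * count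
      then (count, PySem.Int.floordiv count number)
      else (num_members, count)
    balancedLoop tp.1 tp.2

-- ===== PRECONDITION & SPEC =====
-- Pre_ excludes (a) 1 < num_members with int base < 2, where A raises (ValueError for base ≤ 0,
-- ZeroDivisionError for base 1), and (b) forceAll = true with num_members-1 an exact power
-- numberIn^k (k ≥ 2), where A's value is a platform-dependent artefact of CPython's float
-- math.log rounding just below the integer, unmatchable by exact integer arithmetic.
def Pre_judgeGroup (num_members : Int) (numberIn : Int) (forceAll : Bool) : Prop :=
  1 < num_members →
    (2 ≤ numberIn ∧
      (forceAll = true → ∀ k : Nat, k < 32 → 2 ≤ k → numberIn ^ k ≠ num_members - 1))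
instance (num_members : Int) (numberIn : Int) (forceAll : Bool) :
    Decidable (Pre_judgeGroup num_members numberIn forceAll) := by
  unfold Pre_judgeGroup; infer_instance
def pvWitness_judgeGroup : Int × Int × Bool := (23, 4, false)

def Spec_judgeGroup (num_members : Int) (numberIn : Int) (forceAll : Bool) (out : List Int) : Prop := out = judgeGroup_alt num_members numberIn forceAll
instance (num_members : Int) (numberIn : Int) (forceAll : Bool) (out : List Int) : Decidable (Spec_judgeGroup num_members numberIn forceAll out) := by unfold Spec_judgeGroup; infer_instance

-- ===== CLAIM (what is proved, stated in full; the proofs are below) =====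
def Claim_equal_judgeGroup : Prop := ∀ (num_members : Int) (numberIn : Int) (forceAll : Bool), Dom_judgeGroup num_members numberIn forceAll → Pre_judgeGroup num_members numberIn forceAll → Spec_judgeGroup num_members numberIn forceAll (judgeGroup num_members numberIn forceAll)

-- ===== LEMMAS AND PROOFS =====

-- B's recursive log computes the exact floor logarithm: for 1 ≤ x and base ≥ 2,
-- number^(ilogB number x) ≤ x < number^(ilogB number x + 1).
theorem ilogGo_spec (number : Int) (hn : 2 ≤ number) :
    ∀ (fuel : Nat) (x : Int), 1 ≤ x → x ≤ (fuel : Int) →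
      number ^ (ilogGo number fuel x) ≤ x ∧ x < number ^ (ilogGo number fuel x + 1) := by
  intro fuel
  induction fuel with
  | zero => intro x hx hf; exfalso; simp at hf; omega
  | succ f ih =>
    intro x hx hf
    by_cases h : 2 ≤ number ∧ number ≤ x
    · have hnx := h.2
      rw [ilogGo, if_pos h]
      have hfd : PySem.Int.floordiv x number = x / number :=
        PySem.Int.floordiv_eq_ediv_of_pos (by omega)
      have h1 : 1 ≤ x / number :=
        (Int.le_ediv_iff_mul_le (by omega)).mpr (by simpa using hnx)
      have hdm := Int.ediv_add_emod x number
      have hnn := Int.emod_nonneg x (show number ≠ 0 by omega)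
      have hlt := Int.emod_lt_of_pos x (show (0:Int) < number by omega)
      have hmul : number * (x / number) ≤ x := by linarith
      have hrem : x < number * (x / number) + number := by linarith
      have hsmall : x / number ≤ (f : Int) := by
        have hx2 : 2 * (x / number) ≤ number * (x / number) := by nlinarith
        push_cast at hf ⊢
        omega
      obtain ⟨hlo, hhi⟩ := ih (PySem.Int.floordiv x number) (hfd ▸ h1) (hfd ▸ hsmall)
      set r := ilogGo number f (PySem.Int.floordiv x number) with hr
      constructor
      · calc number ^ (1 + r) = number * number ^ r := by rw [pow_add, pow_one]
          _ ≤ number * (x / number) :=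
              mul_le_mul_of_nonneg_left (hfd ▸ hlo) (by omega)
          _ ≤ x := hmul
      · have hsucc : x / number + 1 ≤ number ^ (r + 1) := by
          have := hfd ▸ hhi; omega
        calc x < number * (x / number) + number := hrem
          _ = number * (x / number + 1) := by ring
          _ ≤ number * number ^ (r + 1) := mul_le_mul_of_nonneg_left hsucc (by omega)
          _ = number ^ (1 + r + 1) := by rw [pow_add, pow_add, pow_one]; ring
    · rw [ilogGo, if_neg h]
      have hc : ¬ number ≤ x := fun hc => h ⟨hn, hc⟩
      simpa using ⟨hx, by omega⟩

theorem ilogB_spec (number : Int) (hn : 2 ≤ number) :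
    ∀ x, 1 ≤ x → number ^ (ilogB number x) ≤ x ∧ x < number ^ (ilogB number x + 1) := by
  intro x hx
  exact ilogGo_spec number hn x.toNat x hx (by omega)

-- hence B's recursion agrees with A's exact floor logarithm
theorem ilogB_eq_log (number m1 : Int) (hn : 2 ≤ number) (hm : 1 ≤ m1) :
    ilogB number m1 = Nat.log number.toNat m1.toNat := by
  obtain ⟨h1, h2⟩ := ilogB_spec number hn m1 hm
  have hb : (number.toNat : Int) = number := Int.toNat_of_nonneg (by omega)
  have hm' : (m1.toNat : Int) = m1 := Int.toNat_of_nonneg (by omega)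
  symm
  apply Nat.log_eq_of_pow_le_of_lt_pow
  · have : ((number.toNat ^ ilogB number m1 : Nat) : Int) ≤ (m1.toNat : Int) := by
      push_cast
      rw [hb, hm']; exact h1
    exact_mod_cast this
  · have : ((m1.toNat : Nat) : Int) < ((number.toNat ^ (ilogB number m1 + 1) : Nat) : Int) := by
      push_cast
      rw [hb, hm']; exact h2
    exact_mod_cast this

-- the greedy ceiling-peel loop produces the balanced split: r parts of fd+1 then parts-r of fd
theorem balancedGo_eq :
    ∀ (p : Nat) (fd r total : Int), 0 ≤ r → r < (p : Int) → total = fd * p + r →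
      balancedGo p total p =
        List.replicate r.toNat (fd + 1) ++ List.replicate ((p : Int) - r).toNat fd := by
  intro p
  induction p with
  | zero => intro fd r total h0 hr _; exfalso; simp at hr; omega
  | succ n ih =>
    intro fd r total h0 hr htot
    have hp : (0:Int) < ((n+1:Nat) : Int) := by push_cast; omega
    have hn1 : ((n+1:Nat) : Int) - 1 = (n : Int) := by push_cast; ring
    have hprod : fd * ((n:Int)+1) = fd * (n:Int) + fd := by ring
    push_cast at htot hr
    by_cases hr0 : r = 0
    · subst hr0
      have hq : PySem.Int.floordiv (total + ((n+1:Nat):Int) - 1) ((n+1:Nat):Int) = fd := by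
        rw [PySem.Int.floordiv_eq_iff_of_pos]
        · push_cast
          constructor <;> nlinarith
        · exact hp
      simp only [balancedGo]
      rw [if_pos hp, hq, hn1]
      rcases Nat.eq_zero_or_pos n with hn0 | hnpos
      · subst hn0
        simp [balancedGo]
      · rw [ih fd 0 (total - fd) le_rfl (by exact_mod_cast hnpos) (by omega)]
        simp only [Int.toNat_zero, List.replicate_zero, List.nil_append, sub_zero,
          Int.toNat_natCast]
        rw [List.replicate_succ]
    · have hr1 : 1 ≤ r := by omega
      have hq : PySem.Int.floordiv (total + ((n+1:Nat):Int) - 1) ((n+1:Nat):Int) = fd + 1 := by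
        rw [PySem.Int.floordiv_eq_iff_of_pos]
        · push_cast
          constructor <;> nlinarith
        · exact hp
      simp only [balancedGo]
      rw [if_pos hp, hq, hn1]
      rw [ih fd (r - 1) (total - (fd + 1)) (by omega) (by push_cast; omega) (by omega)]
      rw [show ((n:Int) - (r-1)).toNat = (((n+1:Nat):Int) - r).toNat by push_cast; omega]
      rw [show r.toNat = (r-1).toNat + 1 by omega]
      rw [List.replicate_succ]
      rfl

theorem balancedLoop_eq' (parts fd r total : Int) (h0 : 0 ≤ r) (hr : r < parts)
    (htot : total = fd * parts + r) :
    balancedLoop total parts =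
      List.replicate r.toNat (fd + 1) ++ List.replicate (parts - r).toNat fd := by
  have hcast : ((parts.toNat : Nat) : Int) = parts := Int.toNat_of_nonneg (by omega)
  unfold balancedLoop
  calc balancedGo parts.toNat total parts = balancedGo parts.toNat total ((parts.toNat : Nat) : Int) := by rw [hcast]
    _ = List.replicate r.toNat (fd + 1) ++ List.replicate (((parts.toNat:Nat):Int) - r).toNat fd :=
        balancedGo_eq parts.toNat fd r total h0 (by omega) (by rw [hcast]; exact htot)
    _ = _ := by rw [hcast]

-- a range comprehension `[x if num < res else y for num in range(c)]` is the two homogeneous runs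
theorem map_ite_lt_eq_runs (c res x y : Int) (h0 : 0 ≤ res) (hle : res ≤ c) :
    (PySem.List.pyRange 0 c 1).map (fun num => if num < res then x else y) =
      List.replicate res.toNat x ++ List.replicate (c - res).toNat y := by
  obtain ⟨n, rfl⟩ : ∃ m : Nat, c = (m : Int) := ⟨c.toNat, (Int.toNat_of_nonneg (le_trans h0 hle)).symm⟩
  obtain ⟨a, rfl⟩ : ∃ m : Nat, res = (m : Int) := ⟨res.toNat, (Int.toNat_of_nonneg h0).symm⟩
  have ha : a ≤ n := by exact_mod_cast hle
  rw [PySem.List.pyRange_zero_natCast, List.map_map]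
  have hsplit : n = a + (n - a) := by omega
  conv_lhs => rw [hsplit, List.range_add]
  rw [List.map_append, List.map_map]
  congr 1
  · calc List.map ((fun num => if num < (a:Int) then x else y) ∘ fun k : Nat => (k:Int)) (List.range a)
        = List.map (fun _ => x) (List.range a) := by
          apply List.map_congr_left
          intro k hk
          have : k < a := List.mem_range.mp hk
          simp only [Function.comp_apply]
          rw [if_pos (by exact_mod_cast this)]
      _ = List.replicate ((a : Int)).toNat x := by simp [List.map_const']
  · calc List.map (((fun num => if num < (a:Int) then x else y) ∘ fun k : Nat => (k:Int)) ∘ fun i => a + i) (List.range (n - a))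
        = List.map (fun _ => y) (List.range (n - a)) := by
          apply List.map_congr_left
          intro k hk
          simp only [Function.comp_apply]
          rw [if_neg (by push_cast; omega)]
      _ = List.replicate ((n : Int) - (a : Int)).toNat y := by
          rw [List.map_const']
          congr 1
          simp
  
-- a constant range comprehension is a single run
theorem map_const_pyRange (c v : Int) :
    (PySem.List.pyRange 0 c 1).map (fun _ => v) = List.replicate c.toNat v := by
  rw [List.map_const', PySem.List.length_pyRange_one]
  simp

-- ===== VERDICT (by name: the statement is the Claim_ definition above) =====
theorem judgeGroup_spec : Claim_equal_judgeGroup := by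
  intro m n f hdom hpre
  unfold Spec_judgeGroup judgeGroup judgeGroup_alt
  by_cases hm : 1 < m
  · obtain ⟨hn, -⟩ := hpre hm
    have hm1 : (1:Int) ≤ m - 1 := by omega
    have hk : ilogB n (m-1) = Nat.log n.toNat (m-1).toNat := ilogB_eq_log n (m-1) hn hm1
    simp only [if_pos hm, ← hk]
    set L := ilogB n (m-1) with hLdef
    by_cases hL0 : L = 0
    · simp [hL0]
    · obtain ⟨hlow, hhigh⟩ := ilogB_spec n hn (m-1) hm1
      rw [← hLdef] at hlow hhigh
      have hcount : (0:Int) < n ^ L := pow_pos (by omega) L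
      simp only [if_neg hL0]
      cases f with
      | true =>
        simp only [if_true, Bool.true_eq_false, false_and, if_neg (not_false)]
        have hq := PySem.Int.floordiv_mul_add_mod m (n ^ L)
        have hres : m - PySem.Int.floordiv m (n ^ L) * n ^ L = PySem.Int.mod m (n ^ L) := by omega
        rw [hres, map_ite_lt_eq_runs _ _ _ _ (PySem.Int.mod_nonneg m hcount)
          (le_of_lt (PySem.Int.mod_lt m hcount))]
        rw [balancedLoop_eq' (n ^ L) (PySem.Int.floordiv m (n ^ L)) (PySem.Int.mod m (n ^ L)) m
          (PySem.Int.mod_nonneg m hcount) (PySem.Int.mod_lt m hcount) (by omega)]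
      | false =>
        simp only [Bool.false_eq_true, if_false, true_and]
        split_ifs with hguard
        · -- uniform branch
          have hdiv : PySem.Int.floordiv (n ^ L) n = n ^ (L - 1) := by
            rw [PySem.Int.floordiv_eq_ediv_of_pos (by omega)]
            rw [show n ^ L = n ^ (L - 1) * n by rw [← pow_succ]; congr 1; omega]
            exact Int.mul_ediv_cancel _ (by omega)
          rw [hdiv, map_const_pyRange]
          rw [balancedLoop_eq' (n ^ (L-1)) n 0 (n ^ L) le_rfl (pow_pos (by omega) _)
            (by rw [show n * n ^ (L-1) = n ^ L by rw [← pow_succ']; congr 1; omega]; ring)]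
          simp
        · -- two-run branch: balanced split of m into n^L parts
          have hmax : (n - 1) ≤ max 2 (n - 1) := le_max_right _ _
          have hge : max 2 (n - 1) * n ^ L ≤ m := not_lt.mp hguard
          have h0 : 0 ≤ m - (n - 1) * n ^ L := by
            have : (n - 1) * n ^ L ≤ max 2 (n - 1) * n ^ L :=
              mul_le_mul_of_nonneg_right hmax (le_of_lt hcount)
            omega
          have hle : m - (n - 1) * n ^ L ≤ n ^ L := by
            have hp : n ^ (L + 1) = n * n ^ L := by rw [pow_succ]; ring
            nlinarith [hhigh]
          rw [map_ite_lt_eq_runs _ _ _ _ h0 hle]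
          by_cases hres : m - (n - 1) * n ^ L = n ^ L
          · -- m = n * n^L exactly: all parts equal n
            rw [balancedLoop_eq' (n ^ L) n 0 m le_rfl hcount (by nlinarith [hres])]
            rw [hres]
            simp
          · rw [balancedLoop_eq' (n ^ L) (n - 1) (m - (n - 1) * n ^ L) m h0 (by omega) (by ring)]
            rw [show n - 1 + 1 = n by ring]
  · simp [hm]
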